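-- pv_equiv track=rewrite | github.com/mayukhasagi/Lifeos1 | app/db.py | _convert_sql_for_oracle
-- ===== SOURCE A (Python) =====
-- def _convert_sql_for_oracle(sql: str) -> str:
--     """
--     Naively convert %s parameters into Oracle's positional :1, :2 parameters.
--     Since we don't have %s inside string literals in this app, simple split is safe.
--     """
--     parts = sql.split('%s')
--     if len(parts) == 1:
--         return sql
--     new_sql = parts[0]
--     for i in range(1, len(parts)):
--         new_sql += f":{i}" + parts[i]
--     return new_sql
-- ===== SOURCE B (Python) =====
-- def _convert_sql_for_oracle(sql: str) -> str:
--     # One-pass scan: no parts list; a counter is threaded through a single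
--     # left-to-right walk, emitting :n for each '%s' as it is met.
--     out = []
--     i = 0
--     n = 1
--     length = len(sql)
--     while i < length:
--         if sql.startswith('%s', i):
--             out.append(f':{n}')
--             n += 1
--             i += 2
--         else:
--             out.append(sql[i])
--             i += 1
--     return ''.join(out)
-- ===== Notes on version B (the rewrite author's own statement) =====
-- stated objective: alternative
-- what changed: Replaced split-then-rejoin-by-index with a single left-to-right scan that emits the next positional marker from an incrementing counter at each parameter occurrence, building the output in one pass with no parts list.
import Mathlib
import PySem

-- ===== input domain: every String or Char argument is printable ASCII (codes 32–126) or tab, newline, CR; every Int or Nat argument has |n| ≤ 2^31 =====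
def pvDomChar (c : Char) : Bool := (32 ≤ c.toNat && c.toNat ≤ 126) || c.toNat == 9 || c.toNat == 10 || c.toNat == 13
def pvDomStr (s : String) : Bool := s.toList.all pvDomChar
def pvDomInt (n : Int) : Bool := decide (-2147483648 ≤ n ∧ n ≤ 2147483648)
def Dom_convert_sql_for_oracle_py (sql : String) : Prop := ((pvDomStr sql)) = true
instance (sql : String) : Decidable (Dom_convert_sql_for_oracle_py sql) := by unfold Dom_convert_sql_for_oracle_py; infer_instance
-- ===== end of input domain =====

-- B replaces A's split-and-rejoin with a single left-to-right scan threading a counter; same cost, no parts list.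

-- ===== PORT A =====
-- sql.split('%s'): sep is the nonempty literal "%s", so split? is never none; [] is an unreachable default.
def convert_sql_for_oracle_py (sql : String) : String :=
  let parts : List String := (PySem.Str.split? sql "%s").getD []
  if PySem.List.len parts == 1 then sql
  else
    (PySem.List.pyRange 1 (PySem.List.len parts)).foldl
      (fun new_sql i => new_sql ++ (":" ++ PySem.Int.toStr i) ++ PySem.List.pyGetD parts i "")
      (PySem.List.pyGetD parts 0 "")

-- ===== PORT B =====
-- Hand port of Source B's while-loop (exact): one scan over the characters; at each
-- position, 'sql.startswith("%s", i)' is the pattern '%' :: 's' :: rest, emitting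
-- ':' ++ str(n) and advancing by 2, else the character itself, advancing by 1.
def pvAltGo : List Char → Int → List Char
  | [], _ => []
  | '%' :: 's' :: rest, n => ':' :: ((PySem.Int.toStr n).toList ++ pvAltGo rest (n + 1))
  | c :: rest, n => c :: pvAltGo rest n

def convert_sql_for_oracle_py_alt (sql : String) : String :=
  String.ofList (pvAltGo sql.toList 1)

-- ===== PRECONDITION & SPEC =====
def Spec_convert_sql_for_oracle_py (sql : String) (out : String) : Prop := out = convert_sql_for_oracle_py_alt sql
instance (sql : String) (out : String) : Decidable (Spec_convert_sql_for_oracle_py sql out) := by unfold Spec_convert_sql_for_oracle_py; infer_instance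

-- ===== CLAIM (what is proved, stated in full; the proofs are below) =====
def Claim_equal_convert_sql_for_oracle_py : Prop := ∀ (sql : String), Dom_convert_sql_for_oracle_py sql → Spec_convert_sql_for_oracle_py sql (convert_sql_for_oracle_py sql)

-- ===== LEMMAS AND PROOFS =====

-- Reference recursion for splitting on the fixed separator ['%','s'].
def pvSp : List Char → List (List Char)
  | [] => [[]]
  | '%' :: 's' :: rest => [] :: pvSp rest
  | c :: rest => ((pvSp rest).modifyHead (c :: ·))

theorem pvSp_ne_nil (cs : List Char) : pvSp cs ≠ [] := by
  induction cs using pvSp.induct with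
  | case1 => simp [pvSp]
  | case2 rest ih => simp [pvSp]
  | case3 c rest h ih =>
    rw [pvSp.eq_3 c rest h]
    exact fun hh => ih (by simpa using List.modifyHead_eq_nil_iff.mp hh)

theorem pvSp_singleton (cs : List Char) : ∀ (p : List Char), pvSp cs = [p] → p = cs := by
  induction cs using pvSp.induct with
  | case1 => intro p h; simp [pvSp] at h; simp [h]
  | case2 rest ih =>
    intro p h
    rw [pvSp.eq_2] at h
    injection h with h1 h2
    exact absurd h2 (pvSp_ne_nil rest)
  | case3 c rest h ih =>
    intro p hp
    rw [pvSp.eq_3 c rest h] at hp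
    rcases hr : pvSp rest with _ | ⟨q, qs⟩
    · exact absurd hr (pvSp_ne_nil rest)
    · rw [hr] at hp
      injection hp with hp1 hp2
      subst hp2
      subst hp1
      rw [ih q hr]

-- From a failed isPrefixOf ['%','s'] test to pvSp's catch-all side condition.
theorem pvNotPre (c : Char) (rest : List Char)
    (hpre : ¬ List.isPrefixOf ['%', 's'] (c :: rest) = true) :
    ∀ (rest' : List Char), c = '%' → rest = 's' :: rest' → False := by
  intro rest' hc hr
  subst hc; subst hr
  exact hpre (by simp [List.isPrefixOf])

-- splitOn.go with enough fuel computes pvSp (up to the accumulators).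
theorem pvGo_spec (fuel : Nat) : ∀ (l cur : List Char) (accs : List (List Char)),
    l.length < fuel →
    PySem.Chars.splitOn.go ['%', 's'] fuel l cur accs =
      accs.reverse ++ (pvSp l).modifyHead (cur.reverse ++ ·) := by
  induction fuel with
  | zero => intro l cur accs h; omega
  | succ fuel ih =>
    intro l cur accs h
    rcases l with _ | ⟨c, rest⟩
    · simp [PySem.Chars.splitOn.go, pvSp]
    · by_cases hpre : List.isPrefixOf ['%', 's'] (c :: rest) = true
      · -- the separator is here: c = '%', rest = 's' :: rest'
        rcases rest with _ | ⟨c2, rest'⟩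
        · simp [List.isPrefixOf] at hpre
        · have hc : '%' = c ∧ 's' = c2 := by
            simpa [List.isPrefixOf] using hpre
          rcases hc with ⟨hc1, hc2⟩; subst hc1; subst hc2
          rw [PySem.Chars.splitOn.go, if_pos hpre]
          simp only [List.length_cons, List.length_nil, List.drop_succ_cons, List.drop_zero]
          rw [ih rest' [] (cur.reverse :: accs) (by simp at h ⊢; omega), pvSp.eq_2]
          rcases hr : pvSp rest' with _ | ⟨q, qs⟩
          · exact absurd hr (pvSp_ne_nil rest')
          · simp
      · rw [PySem.Chars.splitOn.go, if_neg hpre,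
          ih rest (c :: cur) accs (by simp at h ⊢; omega),
          pvSp.eq_3 c rest (pvNotPre c rest hpre)]
        rcases hr : pvSp rest with _ | ⟨q, qs⟩
        · exact absurd hr (pvSp_ne_nil rest)
        · simp

theorem pvSplitOn_eq (cs : List Char) : PySem.Chars.splitOn cs ['%', 's'] = pvSp cs := by
  rw [PySem.Chars.splitOn, pvGo_spec (cs.length + 1) cs [] [] (by omega)]
  rcases h : pvSp cs with _ | ⟨q, qs⟩
  · exact absurd h (pvSp_ne_nil cs)
  · simp

-- The ":k" ++ part ++ … tail that A's index loop appends, as one recursion.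
def pvG : List (List Char) → Int → List Char
  | [], _ => []
  | p :: ps, k => ':' :: ((PySem.Int.toStr k).toList ++ p ++ pvG ps (k + 1))

-- B's scan equals head-of-split plus the indexed tail.
theorem pvAltGo_eq (cs : List Char) : ∀ (k : Int),
    pvAltGo cs k = (pvSp cs).headD [] ++ pvG ((pvSp cs).drop 1) k := by
  induction cs using pvSp.induct with
  | case1 => intro k; simp [pvAltGo, pvSp, pvG]
  | case2 rest ih =>
    intro k
    rw [pvAltGo, pvSp.eq_2]
    rcases hr : pvSp rest with _ | ⟨q, qs⟩
    · exact absurd hr (pvSp_ne_nil rest)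
    · simp [pvG, ih, hr]
  | case3 c rest h ih =>
    intro k
    have halt : pvAltGo (c :: rest) k = c :: pvAltGo rest k := by
      rw [pvAltGo.eq_3]
      exact h
    rw [halt, pvSp.eq_3 c rest h]
    rcases hr : pvSp rest with _ | ⟨q, qs⟩
    · exact absurd hr (pvSp_ne_nil rest)
    · simp [ih, hr]

-- String-level counterpart of pvG (what A's loop builds).
def pvGS : List String → Int → String
  | [], _ => ""
  | p :: ps, k => (":" ++ PySem.Int.toStr k) ++ p ++ pvGS ps (k + 1)

theorem pvGS_ofList (ps : List (List Char)) : ∀ (k : Int),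
    pvGS (ps.map String.ofList) k = String.ofList (pvG ps k) := by
  induction ps with
  | nil => intro k; simp [pvGS, pvG]
  | cons p ps ih =>
    intro k
    simp only [List.map_cons, pvGS, pvG, ih]
    apply String.ext
    simp [PySem.Int.toStr]

-- A's foldl over pyRange k len(parts) appends pvGS of the parts from k on.
theorem pvFold_range (parts : List String) (n : Nat) : ∀ (k : Nat) (acc : String),
    parts.length - k = n →
    (PySem.List.pyRange (k : Int) (PySem.List.len parts)).foldl
      (fun new_sql i => new_sql ++ (":" ++ PySem.Int.toStr i) ++ PySem.List.pyGetD parts i "") acc =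
      acc ++ pvGS (parts.drop k) (k : Int) := by
  induction n with
  | zero =>
    intro k acc hk
    have hge : parts.length ≤ k := by omega
    have hr : PySem.List.pyRange (k : Int) (PySem.List.len parts) = [] := by
      simp [PySem.List.pyRange, PySem.List.len]
      omega
    rw [hr, List.drop_eq_nil_of_le hge]
    simp [pvGS]
  | succ n ih =>
    intro k acc hk
    have hlt : k < parts.length := by omega
    have hlen : PySem.List.len parts = (parts.length : Int) := by simp [PySem.List.len]
    rw [hlen, PySem.List.pyRange_one_cons (by exact_mod_cast hlt)]
    simp only [List.foldl_cons]
    have hget : PySem.List.pyGetD parts (k : Int) "" = parts.getD k "" := by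
      simp [PySem.List.pyGetD, PySem.List.pyGet?_natCast, List.getD]
    have hdrop : parts.drop k = parts.getD k "" :: parts.drop (k + 1) := by
      rw [List.getD_eq_getElem _ _ hlt]
      exact (List.drop_eq_getElem_cons hlt)
    have := ih (k + 1) (acc ++ (":" ++ PySem.Int.toStr (k : Int)) ++ PySem.List.pyGetD parts (k : Int) "") (by omega)
    rw [hlen] at this
    push_cast at this ⊢
    rw [this, hdrop, hget]
    simp [pvGS, String.append_assoc]

-- ===== VERDICT (by name: the statement is the Claim_ definition above) =====
theorem pvSplit?_eq (sql : String) :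
    PySem.Str.split? sql "%s" = some ((pvSp sql.toList).map String.ofList) := by
  rw [PySem.Str.split?]
  have hsep : ("%s".toList) = ['%', 's'] := by decide
  rw [hsep, PySem.Chars.split?]
  simp [pvSplitOn_eq]

theorem convert_sql_for_oracle_py_spec : Claim_equal_convert_sql_for_oracle_py := by
  intro sql _
  show convert_sql_for_oracle_py sql = convert_sql_for_oracle_py_alt sql
  rw [convert_sql_for_oracle_py, convert_sql_for_oracle_py_alt, pvAltGo_eq]
  simp only [pvSplit?_eq, Option.getD_some]
  rcases hsp : pvSp sql.toList with _ | ⟨q, qs⟩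
  · exact absurd hsp (pvSp_ne_nil sql.toList)
  · rcases qs with _ | ⟨q2, rest⟩
    · -- one part: no '%s' in sql, both sides are sql itself
      have hq : q = sql.toList := pvSp_singleton sql.toList q hsp
      rw [if_pos (by simp [PySem.List.len])]
      simp [pvG, hq]
    · -- at least two parts
      rw [if_neg (by simp [PySem.List.len]; omega)]
      have hfold := pvFold_range (((q :: q2 :: rest).map String.ofList)) (q2 :: rest).length 1
        (PySem.List.pyGetD ((q :: q2 :: rest).map String.ofList) 0 "") (by simp)
      push_cast at hfold
      rw [hfold]
      have hget : PySem.List.pyGetD (((q :: q2 :: rest)).map String.ofList) 0 "" = String.ofList q := by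
        have h0 : (0 : Int) ≤ (rest.length : Int) + 1 := by positivity
        simp [PySem.List.pyGetD, PySem.List.pyGet?, PySem.List.pyIdx?, h0]
      rw [hget]
      have hdrop : ((q :: q2 :: rest).map String.ofList).drop 1 = (q2 :: rest).map String.ofList := by
        simp
      rw [hdrop, pvGS_ofList]
      simp
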